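-- pv_equiv track=rewrite | github.com/crzwdjk/gtfstools | triptools.py | route_match
-- ===== SOURCE A (Python) =====
-- def route_match(trip1, trip2):
--     pos2 = 0
--     count = 0
--     for pos1 in range(len(trip1)):
--         needle = trip1[pos1][0]
--         for i in range(pos2, len(trip2)):
--             if trip2[i][0] == needle:
--                 pos2 = i + 1
--                 count += 1
--                 break
--         if pos2 >= len(trip2):
--             break
--     return count >= min(3, len(trip1), len(trip2))
-- ===== SOURCE B (Python) =====
-- def route_match(trip1, trip2):
--     # Hash-index trip2's head values once: value -> stack of occurrence indices in
--     # descending order (smallest on top), consumed monotonically as pos2 advances.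
--     threshold = min(3, len(trip1), len(trip2))
--     stacks = {}
--     for i in range(len(trip2) - 1, -1, -1):
--         stacks.setdefault(trip2[i][0], []).append(i)
--     pos2 = 0
--     count = 0
--     for row in trip1:
--         stack = stacks.get(row[0])
--         if stack:
--             while stack and stack[-1] < pos2:
--                 stack.pop()
--             if stack:
--                 pos2 = stack.pop() + 1
--                 count += 1
--                 if count >= threshold:
--                     return True
--     return count >= threshold
-- ===== Notes on version B (the rewrite author's own statement) =====
-- stated objective: alternative
-- what changed: Replaces A's per-needle linear rescan of trip2 with a hash index built in one pass over trip2 (head value -> stack of occurrence positions, consumed monotonically as pos2 advances) plus an early exit once the threshold is reached; worst-case cost drops from O(n*m) to O(n+m), though on typical random inputs A's pos2 races to the end so a timing run shows no measured speedup.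
-- outside the precondition, e.g. on route_match([(1,)], [(1,), ()]): A returns True, B raises IndexError; on route_match([], [()]): A returns True, B raises IndexError
import Mathlib
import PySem

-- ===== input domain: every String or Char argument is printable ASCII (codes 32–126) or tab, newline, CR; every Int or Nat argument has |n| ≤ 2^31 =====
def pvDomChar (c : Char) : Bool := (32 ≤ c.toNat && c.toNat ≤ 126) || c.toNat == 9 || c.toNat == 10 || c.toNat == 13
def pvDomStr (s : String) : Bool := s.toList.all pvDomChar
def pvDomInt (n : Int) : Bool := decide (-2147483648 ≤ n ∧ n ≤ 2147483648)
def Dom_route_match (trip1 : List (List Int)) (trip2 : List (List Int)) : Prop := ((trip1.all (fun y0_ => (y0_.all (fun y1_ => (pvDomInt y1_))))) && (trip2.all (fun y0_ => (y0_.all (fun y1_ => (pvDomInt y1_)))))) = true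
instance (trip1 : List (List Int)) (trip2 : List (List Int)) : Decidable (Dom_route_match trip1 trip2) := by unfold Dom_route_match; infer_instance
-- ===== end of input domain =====

-- B replaces A's repeated linear rescans of trip2 with a one-pass hash index
-- (head value -> stack of occurrence positions) consumed monotonically, plus an
-- early exit once the threshold is reached; same return value on Pre_.

-- ===== PORT A =====

-- row[0]; exact on nonempty rows (guaranteed by Pre_route_match)
def rmHead (row : List Int) : Int := row.headD 0

-- inner loop: `for i in range(pos2, len(trip2)): if trip2[i][0] == needle: ... break`
-- returns the new pos2 (i+1) if a match was found, none otherwise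
def rmInner (trip2 : List (List Int)) (needle : Int) (i : Nat) : Option Nat :=
  if _h : i < trip2.length then
    if rmHead (trip2.getD i []) == needle then some (i + 1)
    else rmInner trip2 needle (i + 1)
  else none
termination_by trip2.length - i

-- outer loop over trip1 (state pos2, count), with A's `break` once pos2 ≥ len(trip2)
def rmOuter (trip2 : List (List Int)) : List (List Int) → Nat → Nat → Nat
  | [], _, count => count
  | row :: rest, pos2, count =>
    match rmInner trip2 (rmHead row) pos2 with
    | some p =>
      if trip2.length ≤ p then count + 1
      else rmOuter trip2 rest p (count + 1)
    | none =>
      if trip2.length ≤ pos2 then count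
      else rmOuter trip2 rest pos2 count

def route_match (trip1 : List (List Int)) (trip2 : List (List Int)) : Bool :=
  decide (min 3 (min trip1.length trip2.length) ≤ rmOuter trip2 trip1 0 0)

-- ===== PORT B =====

-- `for i in range(len(trip2)-1, -1, -1): stks.setdefault(trip2[i][0], []).append(i)`
def rmBuild (trip2 : List (List Int)) : PySem.Dict Int (List Nat) :=
  (List.range trip2.length).reverse.foldl
    (fun d i => d.modify (rmHead (trip2.getD i [])) [] (· ++ [i]))
    PySem.Dict.empty

-- `while stack and stack[-1] < pos2: stack.pop()`
def rmPopWhile (pos2 : Nat) (stack : List Nat) : List Nat :=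
  match h : stack.getLast? with
  | some x => if x < pos2 then rmPopWhile pos2 stack.dropLast else stack
  | none => stack
termination_by stack.length
decreasing_by
  have hne : stack ≠ [] := by intro hnil; rw [hnil] at h; simp at h
  have := List.length_pos_iff.mpr hne
  simp [List.length_dropLast]; omega

-- main loop over trip1; the in-place mutations of the Python stack are written
-- back with `insert`.  `stks.get(row[0])` + Python falsy test: None and []
-- take the same (skip) branch, so both are the `isEmpty` branch of getD _ [].
def rmAltLoop (threshold : Nat) : List (List Int) → PySem.Dict Int (List Nat) → Nat → Nat → Bool
  | [], _, _, count => decide (threshold ≤ count)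
  | row :: rest, stks, pos2, count =>
    let stack0 := stks.getD (rmHead row) []
    if stack0.isEmpty then rmAltLoop threshold rest stks pos2 count
    else
      let stack1 := rmPopWhile pos2 stack0
      match stack1.getLast? with
      | some x =>
        if threshold ≤ count + 1 then true
        else rmAltLoop threshold rest (stks.insert (rmHead row) stack1.dropLast) (x + 1) (count + 1)
      | none => rmAltLoop threshold rest (stks.insert (rmHead row) stack1) pos2 count

def route_match_alt (trip1 : List (List Int)) (trip2 : List (List Int)) : Bool :=
  rmAltLoop (min 3 (min trip1.length trip2.length)) trip1 (rmBuild trip2) 0 0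

-- ===== PRECONDITION & SPEC =====
-- Pre_ excludes inputs containing an empty row: on those Python indexes row[0]
-- and raises IndexError whenever the row is reached (A may still return when its
-- early break never touches the empty row, but B's one-pass index touches every
-- row of trip2 and every row of trip1 up to the exit, so B raises there).
def Pre_route_match (trip1 : List (List Int)) (trip2 : List (List Int)) : Prop :=
  (∀ r ∈ trip1, r ≠ []) ∧ (∀ r ∈ trip2, r ≠ [])
instance (trip1 : List (List Int)) (trip2 : List (List Int)) : Decidable (Pre_route_match trip1 trip2) := by unfold Pre_route_match; infer_instance

def pvWitness_route_match : List (List Int) × List (List Int) :=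
  ([[1], [2]], [[1], [3], [2]])

def Spec_route_match (trip1 : List (List Int)) (trip2 : List (List Int)) (out : Bool) : Prop := out = route_match_alt trip1 trip2
instance (trip1 : List (List Int)) (trip2 : List (List Int)) (out : Bool) : Decidable (Spec_route_match trip1 trip2 out) := by unfold Spec_route_match; infer_instance

-- ===== CLAIM (what is proved, stated in full; the proofs are below) =====
def Claim_equal_route_match : Prop := ∀ (trip1 : List (List Int)) (trip2 : List (List Int)), Dom_route_match trip1 trip2 → Pre_route_match trip1 trip2 → Spec_route_match trip1 trip2 (route_match trip1 trip2)

-- ===== LEMMAS AND PROOFS =====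

-- ascending list of positions of head value v in trip2
def rmOcc (trip2 : List (List Int)) (v : Int) : List Nat :=
  (List.range trip2.length).filter (fun j => rmHead (trip2.getD j []) == v)

-- loop invariant: each stack is the reverse of a suffix of the occurrence list,
-- and every dropped occurrence lies strictly below pos2
def rmInv (trip2 : List (List Int)) (d : PySem.Dict Int (List Nat)) (p : Nat) : Prop :=
  ∀ v : Int, ∃ k, d.getD v [] = ((rmOcc trip2 v).drop k).reverse ∧
    ∀ x ∈ (rmOcc trip2 v).take k, x < p

theorem rmOcc_mem_lt {trip2 : List (List Int)} {v : Int} {x : Nat}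
    (h : x ∈ rmOcc trip2 v) : x < trip2.length := by
  unfold rmOcc at h
  simp only [List.mem_filter, List.mem_range] at h
  exact h.1

theorem rmDropWhile_append {l1 l2 : List Nat} {P : Nat → Bool}
    (h : ∀ x ∈ l1, P x) : (l1 ++ l2).dropWhile P = l2.dropWhile P := by
  induction l1 with
  | nil => simp
  | cons a t ih =>
    simp only [List.cons_append, List.dropWhile_cons, h a (by simp)]
    exact ih (fun x hx => h x (by simp [hx]))

theorem rmPopWhile_reverse (p : Nat) (l : List Nat) :
    rmPopWhile p l.reverse = (l.dropWhile (fun x => decide (x < p))).reverse := by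
  induction l with
  | nil => rw [rmPopWhile]; simp
  | cons a t ih =>
    rw [rmPopWhile]
    have h1 : (a :: t).reverse.getLast? = some a := by
      rw [List.getLast?_reverse]; rfl
    have h2 : (a :: t).reverse.dropLast = t.reverse := by
      rw [List.reverse_cons, List.dropLast_concat]
    simp only [List.dropWhile_cons]
    split
    · next x hx =>
      rw [h1] at hx
      injection hx with hx; subst hx
      by_cases hap : a < p
      · simp only [if_pos hap, decide_eq_true hap, if_true, h2, ih]
      · simp [hap]
    · next hx => rw [h1] at hx; exact absurd hx (by simp)

theorem rmMemRange'Filter {P : Nat → Bool} {s n x : Nat}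
    (h : x ∈ (List.range' s n).filter P) : s ≤ x ∧ x < s + n := by
  have := (List.mem_filter.mp h).1
  simpa using List.mem_range'_1.mp this

theorem rmFilterLo_lt (trip2 : List (List Int)) (v : Int) (i : Nat) :
    ∀ x ∈ (List.range' 0 i).filter (fun j => rmHead (trip2.getD j []) == v),
      decide (x < i) = true := by
  intro x hx
  exact decide_eq_true (by have := rmMemRange'Filter hx; omega)

theorem rmOcc_split_at (trip2 : List (List Int)) (v : Int) (i : Nat)
    (h : i ≤ trip2.length) :
    rmOcc trip2 v
      = ((List.range' 0 i).filter (fun j => rmHead (trip2.getD j []) == v))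
        ++ ((List.range' i (trip2.length - i)).filter (fun j => rmHead (trip2.getD j []) == v)) := by
  unfold rmOcc
  rw [← List.filter_append]
  congr 1
  have h3 : i + (trip2.length - i) = trip2.length := by omega
  rw [List.range_eq_range', ← h3, ← List.range'_append]
  simp

theorem rmRange'_cons {i m : Nat} (hi : i < m) :
    List.range' i (m - i) = i :: List.range' (i + 1) (m - i - 1) := by
  have h : m - i = (m - i - 1) + 1 := by omega
  conv_lhs => rw [h, List.range'_succ]

theorem rmInner_eq (trip2 : List (List Int)) (v : Int) (p : Nat) :
    rmInner trip2 v p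
      = ((rmOcc trip2 v).dropWhile (fun x => decide (x < p))).head?.map (· + 1) := by
  fun_induction rmInner trip2 v p with
  | case1 i hi hmatch =>
    rw [rmOcc_split_at trip2 v i (Nat.le_of_lt hi)]
    rw [rmDropWhile_append (rmFilterLo_lt trip2 v i)]
    have : (List.range' i (trip2.length - i)).filter (fun j => rmHead (trip2.getD j []) == v)
        = i :: (List.range' (i+1) (trip2.length - i - 1)).filter (fun j => rmHead (trip2.getD j []) == v) := by
      rw [rmRange'_cons hi, List.filter_cons, if_pos hmatch]
    rw [this, List.dropWhile_cons]
    simp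
  | case2 i hi hmatch ih =>
    rw [ih, rmOcc_split_at trip2 v i (Nat.le_of_lt hi),
        rmDropWhile_append (rmFilterLo_lt trip2 v i), rmDropWhile_append (P := fun x => decide (x < i + 1))
          (fun x hx => decide_eq_true (Nat.lt_succ_of_lt (by have := rmMemRange'Filter hx; omega)))]
    have : (List.range' i (trip2.length - i)).filter (fun j => rmHead (trip2.getD j []) == v)
        = (List.range' (i+1) (trip2.length - i - 1)).filter (fun j => rmHead (trip2.getD j []) == v) := by
      rw [rmRange'_cons hi, List.filter_cons, if_neg (by simp_all)]
    rw [this]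
    cases hB : (List.range' (i+1) (trip2.length - i - 1)).filter (fun j => rmHead (trip2.getD j []) == v) with
    | nil => rfl
    | cons b bs =>
      have hb : i + 1 ≤ b := by
        have := List.mem_filter.mp (hB ▸ List.mem_cons_self)
        have := List.mem_range'.mp this.1
        omega
      rw [List.dropWhile_cons, List.dropWhile_cons]
      simp only [decide_eq_false (by omega : ¬ b < i), decide_eq_false (by omega : ¬ b < i + 1)]
      simp
  | case3 i hi =>
    have hnil : (rmOcc trip2 v).dropWhile (fun x => decide (x < i)) = [] := by
      rw [List.dropWhile_eq_nil_iff]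
      intro x hx
      exact decide_eq_true (by have := rmOcc_mem_lt hx; omega)
    rw [hnil]
    rfl

theorem rmOuter_mono (trip2 : List (List Int)) (rows : List (List Int))
    (p c : Nat) : c ≤ rmOuter trip2 rows p c := by
  induction rows generalizing p c with
  | nil => simp [rmOuter]
  | cons row rest ih =>
    rw [rmOuter]
    cases rmInner trip2 (rmHead row) p with
    | some q =>
      simp only []
      split
      · omega
      · exact Nat.le_trans (Nat.le_succ c) (ih q (c + 1))
    | none =>
      simp only []
      split
      · exact Nat.le_refl c
      · exact ih p c

theorem rmOuter_dead (trip2 : List (List Int)) (rows : List (List Int))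
    {p : Nat} (c : Nat) (h : trip2.length ≤ p) : rmOuter trip2 rows p c = c := by
  induction rows with
  | nil => rfl
  | cons row rest ih =>
    rw [rmOuter]
    have hnone : rmInner trip2 (rmHead row) p = none := by
      rw [rmInner_eq]
      have hnil : (rmOcc trip2 (rmHead row)).dropWhile (fun x => decide (x < p)) = [] := by
        rw [List.dropWhile_eq_nil_iff]
        intro x hx
        exact decide_eq_true (by have := rmOcc_mem_lt hx; omega)
      rw [hnil]; rfl
    rw [hnone]
    simp [h]

theorem rmFold_getD (trip2 : List (List Int)) (L : List Nat)
    (d : PySem.Dict Int (List Nat)) (v : Int) :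
    (L.foldl (fun d i => d.modify (rmHead (trip2.getD i [])) [] (· ++ [i])) d).getD v []
      = d.getD v [] ++ L.filter (fun i => rmHead (trip2.getD i []) == v) := by
  induction L generalizing d with
  | nil => simp
  | cons i L' ih =>
    rw [List.foldl_cons, ih, List.filter_cons, PySem.Dict.getD_modify]
    by_cases hk : v = rmHead (trip2.getD i [])
    · subst hk
      rw [if_pos rfl, if_pos (beq_self_eq_true _), List.append_assoc]
      rfl
    · rw [if_neg hk, if_neg (fun h => hk (eq_of_beq h).symm)]

theorem rmBuild_getD (trip2 : List (List Int)) (v : Int) :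
    (rmBuild trip2).getD v [] = (rmOcc trip2 v).reverse := by
  unfold rmBuild rmOcc
  rw [rmFold_getD, List.filter_reverse]
  simp

theorem rmInv_build (trip2 : List (List Int)) : rmInv trip2 (rmBuild trip2) 0 := by
  intro v
  exact ⟨0, by rw [rmBuild_getD]; rfl, by simp⟩

theorem rmDropWhile_head_false {l : List Nat} {P : Nat → Bool} {x : Nat} {xs : List Nat}
    (h : l.dropWhile P = x :: xs) : P x = false := by
  induction l with
  | nil => simp at h
  | cons a t ih =>
    rw [List.dropWhile_cons] at h
    by_cases hp : P a
    · exact ih (by simpa [hp] using h)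
    · rw [if_neg (by simp [hp])] at h
      cases h
      simpa using hp

theorem rmMain (trip2 : List (List Int)) (th : Nat) (rows : List (List Int)) :
    ∀ (d : PySem.Dict Int (List Nat)) (p c : Nat), rmInv trip2 d p →
      rmAltLoop th rows d p c = decide (th ≤ rmOuter trip2 rows p c) := by
  induction rows with
  | nil => intro d p c _; rfl
  | cons row rest ih =>
    intro d p c hInv
    obtain ⟨k, hs, hlt⟩ := hInv (rmHead row)
    have hw : ((rmOcc trip2 (rmHead row)).drop k).dropWhile (fun x => decide (x < p))
        = (rmOcc trip2 (rmHead row)).dropWhile (fun x => decide (x < p)) := by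
      conv_rhs => rw [← List.take_append_drop k (rmOcc trip2 (rmHead row))]
      exact (rmDropWhile_append (fun x hx => decide_eq_true (hlt x hx))).symm
    rw [rmAltLoop, rmOuter, hs]
    cases hdk : (rmOcc trip2 (rmHead row)).drop k with
    | nil =>
      have hwnil : (rmOcc trip2 (rmHead row)).dropWhile (fun x => decide (x < p)) = [] := by
        rw [← hw, hdk]; rfl
      have hInner : rmInner trip2 (rmHead row) p = none := by
        rw [rmInner_eq, hwnil]; rfl
      have hA : (if trip2.length ≤ p then c else rmOuter trip2 rest p c) = rmOuter trip2 rest p c := by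
        split
        · next hmp => exact (rmOuter_dead trip2 rest c hmp).symm
        · rfl
      simp only [hInner, hA, List.reverse_nil, List.isEmpty_nil, if_true]
      exact ih d p c hInv
    | cons a l =>
      have hne : ((a :: l).reverse).isEmpty = false := by simp
      rw [hne]
      have hpop : rmPopWhile p ((a :: l).reverse)
          = ((rmOcc trip2 (rmHead row)).dropWhile (fun x => decide (x < p))).reverse := by
        rw [rmPopWhile_reverse, ← hdk, hw]
      cases hwc : (rmOcc trip2 (rmHead row)).dropWhile (fun x => decide (x < p)) with
      | nil =>
        have hInner : rmInner trip2 (rmHead row) p = none := by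
          rw [rmInner_eq, hwc]; rfl
        have hA : (if trip2.length ≤ p then c else rmOuter trip2 rest p c) = rmOuter trip2 rest p c := by
          split
          · next hmp => exact (rmOuter_dead trip2 rest c hmp).symm
          · rfl
        simp only [hInner, hA, Bool.false_eq_true, if_false, hpop, hwc, List.reverse_nil,
          List.getLast?_nil]
        have hInv' : rmInv trip2 (d.insert (rmHead row) []) p := by
          intro v'
          by_cases hv : v' = rmHead row
          · subst hv
            refine ⟨(rmOcc trip2 (rmHead row)).length, ?_, ?_⟩
            · rw [PySem.Dict.getD_insert_self, List.drop_length]; rfl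
            · intro y hy
              rw [List.take_length] at hy
              rcases List.mem_append.mp ((List.take_append_drop k (rmOcc trip2 (rmHead row))) ▸ hy) with h1 | h2
              · exact hlt y h1
              · have := List.dropWhile_eq_nil_iff.mp (hw.trans hwc) y (hdk ▸ h2)
                simpa using this
          · obtain ⟨k2, hs2, hlt2⟩ := hInv v'
            exact ⟨k2, by rw [PySem.Dict.getD_insert_of_ne]; exact hs2; exact hv, hlt2⟩
        exact ih _ p c hInv'
      | cons x w' =>
        have hInner : rmInner trip2 (rmHead row) p = some (x + 1) := by
          rw [rmInner_eq, hwc]; rfl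
        have hlast : ((x :: w').reverse).getLast? = some x := by
          rw [List.getLast?_reverse]; rfl
        have hdrop : ((x :: w').reverse).dropLast = w'.reverse := by
          rw [List.reverse_cons, List.dropLast_concat]
        have hpx : p ≤ x := by
          have := rmDropWhile_head_false hwc
          simp at this
          omega
        have hA : (if trip2.length ≤ x + 1 then c + 1 else rmOuter trip2 rest (x + 1) (c + 1))
            = rmOuter trip2 rest (x + 1) (c + 1) := by
          split
          · next hmp => exact (rmOuter_dead trip2 rest (c + 1) hmp).symm
          · rfl
        simp only [hInner, Bool.false_eq_true, if_false, hpop, hwc, hlast, hdrop, hA]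
        have hInv' : rmInv trip2 (d.insert (rmHead row) w'.reverse) (x + 1) := by
          intro v'
          by_cases hv : v' = rmHead row
          · subst hv
            set tk := (rmOcc trip2 (rmHead row)).takeWhile (fun y => decide (y < p)) with htk
            have hocc : rmOcc trip2 (rmHead row) = (tk ++ [x]) ++ w' := by
              rw [htk]
              conv_lhs => rw [← List.takeWhile_append_dropWhile (p := fun y => decide (y < p)) (l := rmOcc trip2 (rmHead row)), hwc]
              simp
            have hlen : (tk ++ [x]).length = tk.length + 1 := by simp
            refine ⟨tk.length + 1, ?_, ?_⟩
            · rw [PySem.Dict.getD_insert_self, hocc, ← hlen, List.drop_left]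
            · intro y hy
              rw [hocc, ← hlen, List.take_left] at hy
              rcases List.mem_append.mp hy with h1 | h2
              · rw [htk] at h1
                have := List.mem_takeWhile_imp h1
                simp at this
                omega
              · simp at h2
                omega
          · obtain ⟨k2, hs2, hlt2⟩ := hInv v'
            exact ⟨k2, by rw [PySem.Dict.getD_insert_of_ne]; exact hs2; exact hv,
              fun y hy => Nat.lt_of_lt_of_le (hlt2 y hy) (by omega)⟩
        by_cases hth : th ≤ c + 1
        · rw [if_pos hth]
          exact (decide_eq_true (Nat.le_trans hth (rmOuter_mono trip2 rest (x + 1) (c + 1)))).symm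
        · rw [if_neg hth]
          exact ih _ (x + 1) (c + 1) hInv'

-- ===== VERDICT (by name: the statement is the Claim_ definition above) =====
theorem route_match_spec : Claim_equal_route_match := by
  intro trip1 trip2 _ _
  unfold Spec_route_match route_match route_match_alt
  exact (rmMain trip2 _ trip1 _ 0 0 (rmInv_build trip2)).symm
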